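-- pv_equiv track=rewrite | github.com/torrvision/seqtrack | python/seqtrack/sample.py | find_with_subsequent_within
-- ===== SOURCE A (Python) =====
-- def find_with_subsequent_within(seq_len, valid_set, low, high):
--     '''Finds the elements that have a subsequent neighbour with distance in [low, high).
--
--     Finds the indices i such that (i in valid_set) and
--     there exists j such that j - i in [low, high) and (j in valid_set) is true.
--
--     >>> find_with_subsequent_within(4, set(), 1, 3)
--     []
--     >>> find_with_subsequent_within(4, set(range(4)), 1, 4)
--     [0, 1, 2]
--     >>> find_with_subsequent_within(4, set(range(4)), 2, 4)
--     [0, 1]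
--     >>> find_with_subsequent_within(5, set([0, 2, 4]), 1, 2)
--     []
--     >>> find_with_subsequent_within(5, set([0, 2, 4]), 1, 3)
--     [0, 2]
--     >>> find_with_subsequent_within(6, set([0, 1, 4, 5]), 2, 3)
--     []
--     >>> find_with_subsequent_within(6, set([0, 1, 4, 5]), 1, 3)
--     [0, 4]
--     >>> find_with_subsequent_within(6, set([0, 1, 4, 5]), 1, 4)
--     [0, 1, 4]
--     >>> find_with_subsequent_within(10, set([1, 4, 8]), 1, 4)
--     [1]
--     >>> find_with_subsequent_within(10, set([1, 5, 8]), 1, 4)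
--     [5]
--     >>> find_with_subsequent_within(4, set([0, 1, 3]), 2, 3)
--     [1]
--     '''
--
--     if low is None:
--         low = 1
--     assert low >= 1
--     if high is None:
--         high = seq_len
--     # If |x - y| in [low, high) and y > x
--     # then y - x in [low, high).
--     # This is equivalent to y in [x + low, x + high).
--     result = []
--     x = 0
--     a = low
--     b = high
--     # Initialize count.
--     count = sum(1 for y in range(a, b) if (y in valid_set))
--     # Continue until [a, b) is outside [0, seq_len)
--     while a < seq_len:
--         if (x in valid_set) and count > 0:
--             result.append(x)
--         # Advance one position.
--         x += 1
--         # Lose element a.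
--         if (a in valid_set):
--             count -= 1
--         # Gain element b.
--         if b < seq_len and (b in valid_set):
--             count += 1
--         a += 1
--         b += 1
--     return result
-- ===== SOURCE B (Python) =====
-- def find_with_subsequent_within(seq_len, valid_set, low, high):
--     # Event-sweep reformulation: the running window count is reconstructed from a
--     # difference map of per-element events instead of per-step membership queries.
--     if low is None:
--         low = 1
--     assert low >= 1
--     if high is None:
--         high = seq_len
--     n_iter = seq_len - low
--     base = 0
--     delta = {}
--     for y in valid_set:
--         if low <= y < high:
--             base += 1
--         if y >= low and y - low + 1 < n_iter:
--             k = y - low + 1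
--             delta[k] = delta.get(k, 0) - 1
--         if high <= y < seq_len and y - high + 1 < n_iter:
--             k = y - high + 1
--             delta[k] = delta.get(k, 0) + 1
--     result = []
--     count = base
--     for x in range(n_iter):
--         count += delta.get(x, 0)
--         if x in valid_set and count > 0:
--             result.append(x)
--     return result
-- ===== Notes on version B (the rewrite author's own statement) =====
-- stated objective: alternative
-- what changed: A maintains the window count incrementally with two membership tests per loop step (plus an initial scan of range(low, high)); B instead precomputes a difference map of per-element count events (one loss and one gain event per set element) in a single pass over the set and then reconstructs the running count by prefix-summing that map while sweeping x, with no per-step membership tests on the window endpoints.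
import Mathlib
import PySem

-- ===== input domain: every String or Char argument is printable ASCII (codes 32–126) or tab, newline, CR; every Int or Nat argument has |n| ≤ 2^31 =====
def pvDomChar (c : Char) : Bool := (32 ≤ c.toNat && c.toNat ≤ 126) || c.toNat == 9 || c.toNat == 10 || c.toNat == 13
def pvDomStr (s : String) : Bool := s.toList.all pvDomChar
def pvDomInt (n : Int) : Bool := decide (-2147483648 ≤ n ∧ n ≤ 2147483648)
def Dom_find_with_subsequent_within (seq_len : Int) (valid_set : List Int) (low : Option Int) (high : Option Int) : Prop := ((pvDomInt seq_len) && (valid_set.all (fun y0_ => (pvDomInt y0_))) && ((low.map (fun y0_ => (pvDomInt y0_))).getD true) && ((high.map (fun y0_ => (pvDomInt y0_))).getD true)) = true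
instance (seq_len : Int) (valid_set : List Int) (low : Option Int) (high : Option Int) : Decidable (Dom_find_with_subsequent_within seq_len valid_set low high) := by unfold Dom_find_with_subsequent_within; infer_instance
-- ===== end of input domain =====

-- B replaces A's per-step sliding-count bookkeeping by a precomputed difference map of
-- count events that is prefix-summed while sweeping x (alternative algorithm; no speed claim).

-- ===== PORT A =====
def pvLoopA (seq_len : Int) (valid : List Int) (x a b count : Int) (result : List Int) : List Int :=
  if _h : a < seq_len then
    pvLoopA seq_len valid (x + 1) (a + 1) (b + 1)
      (if decide (b < seq_len) && valid.contains b
        then (if valid.contains a then count - 1 else count) + 1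
        else (if valid.contains a then count - 1 else count))
      (if valid.contains x && decide (count > 0) then result ++ [x] else result)
  else result
termination_by (seq_len - a).toNat
decreasing_by omega

def find_with_subsequent_within (seq_len : Int) (valid_set : List Int) (low : Option Int) (high : Option Int) : List Int :=
  let low := low.getD 1
  let high := high.getD seq_len
  let count : Int := ((PySem.List.pyRange low high 1).filter (fun y => valid_set.contains y)).length
  pvLoopA seq_len valid_set 0 low high count []

-- ===== PORT B =====
def pvEvents (seq_len low high n_iter : Int) (valid : List Int) : Int × PySem.Dict Int Int :=
  valid.foldl (fun bd y =>
    ((if decide (low ≤ y) && decide (y < high) then bd.1 + 1 else bd.1),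
     (fun d1 => if decide (high ≤ y) && decide (y < seq_len) && decide (y - high + 1 < n_iter) then
          d1.insert (y - high + 1) (d1.getD (y - high + 1) 0 + 1) else d1)
       (if decide (low ≤ y) && decide (y - low + 1 < n_iter) then
          bd.2.insert (y - low + 1) (bd.2.getD (y - low + 1) 0 - 1) else bd.2)))
    ((0 : Int), PySem.Dict.empty)

def find_with_subsequent_within_alt (seq_len : Int) (valid_set : List Int) (low : Option Int) (high : Option Int) : List Int :=
  let low := low.getD 1
  let high := high.getD seq_len
  let n_iter := seq_len - low
  let bd := pvEvents seq_len low high n_iter valid_set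
  let cr := (PySem.List.pyRange 0 n_iter 1).foldl (fun (cr : Int × List Int) x =>
      (cr.1 + bd.2.getD x 0,
       if valid_set.contains x && decide (cr.1 + bd.2.getD x 0 > 0) then cr.2 ++ [x] else cr.2))
    (bd.1, ([] : List Int))
  cr.2

-- ===== PRECONDITION & SPEC =====
-- Pre_ excludes (a) low = some l with l < 1, where A's 'assert low >= 1' raises AssertionError,
-- and (b) lists with duplicate elements, which cannot arise from the Python set valid_set
-- (the type convention maps set[int] to a List Int of its distinct elements).
def Pre_find_with_subsequent_within (seq_len : Int) (valid_set : List Int) (low : Option Int) (high : Option Int) : Prop :=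
  1 ≤ low.getD 1 ∧ valid_set.Nodup
instance (seq_len : Int) (valid_set : List Int) (low : Option Int) (high : Option Int) : Decidable (Pre_find_with_subsequent_within seq_len valid_set low high) := by unfold Pre_find_with_subsequent_within; infer_instance

def pvWitness_find_with_subsequent_within : Int × List Int × Option Int × Option Int := (5, [0, 2, 4], some 1, some 3)

def Spec_find_with_subsequent_within (seq_len : Int) (valid_set : List Int) (low : Option Int) (high : Option Int) (out : List Int) : Prop := out = find_with_subsequent_within_alt seq_len valid_set low high
instance (seq_len : Int) (valid_set : List Int) (low : Option Int) (high : Option Int) (out : List Int) : Decidable (Spec_find_with_subsequent_within seq_len valid_set low high out) := by unfold Spec_find_with_subsequent_within; infer_instance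

-- ===== CLAIM (what is proved, stated in full; the proofs are below) =====
def Claim_equal_find_with_subsequent_within : Prop := ∀ (seq_len : Int) (valid_set : List Int) (low : Option Int) (high : Option Int), Dom_find_with_subsequent_within seq_len valid_set low high → Pre_find_with_subsequent_within seq_len valid_set low high → Spec_find_with_subsequent_within seq_len valid_set low high (find_with_subsequent_within seq_len valid_set low high)

-- ===== LEMMAS AND PROOFS =====

-- number of members of `valid` in [l, u)
def pvC (valid : List Int) (l u : Int) : Int :=
  ((PySem.List.pyRange l u 1).filter (fun y => valid.contains y)).length

-- number of members of `valid` in [l, u) that are < sl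
def pvCc (sl : Int) (valid : List Int) (l u : Int) : Int :=
  ((PySem.List.pyRange l u 1).filter (fun y => valid.contains y && decide (y < sl))).length

-- the exact running count of A at loop step x
def pvCount (sl L H : Int) (valid : List Int) (x : Int) : Int :=
  pvC valid L H - pvC valid L (L + x) + pvCc sl valid H (H + x)

theorem pvC_succ (valid : List Int) (l x : Int) (hx : 0 ≤ x) :
    pvC valid l (l + x + 1) = pvC valid l (l + x) + (if valid.contains (l + x) then 1 else 0) := by
  unfold pvC
  rw [PySem.List.pyRange_one_succ_right (by omega : l ≤ l + x), List.filter_append]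
  simp only [List.length_append, List.filter_cons, List.filter_nil]
  split_ifs with h <;> simp

theorem pvCc_succ (sl : Int) (valid : List Int) (l x : Int) (hx : 0 ≤ x) :
    pvCc sl valid l (l + x + 1) = pvCc sl valid l (l + x) + (if valid.contains (l + x) && decide (l + x < sl) then 1 else 0) := by
  unfold pvCc
  rw [PySem.List.pyRange_one_succ_right (by omega : l ≤ l + x), List.filter_append]
  simp only [List.length_append, List.filter_cons, List.filter_nil]
  split_ifs with h <;> simp

theorem pvCount_zero (sl L H : Int) (valid : List Int) : pvCount sl L H valid 0 = pvC valid L H := by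
  unfold pvCount pvC pvCc
  rw [PySem.List.pyRange_one_eq_nil (by omega : L + 0 ≤ L), PySem.List.pyRange_one_eq_nil (by omega : H + 0 ≤ H)]
  simp

theorem pvCount_succ (sl L H : Int) (valid : List Int) (x : Int) (hx : 0 ≤ x) :
    pvCount sl L H valid (x + 1) =
      pvCount sl L H valid x - (if valid.contains (L + x) then 1 else 0)
        + (if valid.contains (H + x) && decide (H + x < sl) then 1 else 0) := by
  unfold pvCount
  have h1 : L + (x + 1) = L + x + 1 := by ring
  have h2 : H + (x + 1) = H + x + 1 := by ring
  rw [h1, h2, pvC_succ valid L x hx, pvCc_succ sl valid H x hx]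
  ring

theorem pvLoopA_eq (sl L H : Int) (valid : List Int) :
    ∀ (n : Nat) (x a b count : Int) (res : List Int), (sl - a).toNat = n → a = L + x → b = H + x → 0 ≤ x →
      count = pvCount sl L H valid x →
      pvLoopA sl valid x a b count res =
        res ++ (PySem.List.pyRange x (max x (sl - L)) 1).filter
          (fun t => valid.contains t && decide (pvCount sl L H valid t > 0)) := by
  intro n
  induction n with
  | zero =>
    intro x a b count res h0 ha hb hx hc
    subst ha hb
    rw [pvLoopA, dif_neg (by omega : ¬ (L + x < sl))]
    rw [max_eq_left (by omega : sl - L ≤ x), PySem.List.pyRange_one_eq_nil (le_refl x)]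
    simp
  | succ n ih =>
    intro x a b count res h0 ha hb hx hc
    subst ha hb
    have hlt : L + x < sl := by omega
    rw [pvLoopA, dif_pos hlt]
    rw [ih (x + 1) (L + x + 1) (H + x + 1) _ _ (by omega) (by ring) (by ring) (by omega) ?_]
    · rw [max_eq_right (by omega : x ≤ sl - L), max_eq_right (by omega : x + 1 ≤ sl - L)]
      rw [PySem.List.pyRange_one_cons (by omega : x < sl - L), List.filter_cons]
      rw [hc]
      by_cases hp : (valid.contains x && decide (pvCount sl L H valid x > 0)) = true
      · rw [if_pos hp, if_pos hp]
        simp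
      · rw [if_neg hp, if_neg hp]
    · rw [pvCount_succ sl L H valid x hx, hc]
      have hcomm : (decide (H + x < sl) && valid.contains (H + x))
          = (valid.contains (H + x) && decide (H + x < sl)) := Bool.and_comm _ _
      rw [hcomm]
      split_ifs <;> omega

-- unfolding pvEvents' foldl: the difference map at key k, for an arbitrary start state
set_option maxRecDepth 4000 in
theorem pvEvents_fold_getD (sl L H ni : Int) (k : Int) :
    ∀ (ys : List Int) (b0 : Int) (d0 : PySem.Dict Int Int),
      ((ys.foldl (fun bd y =>
          ((if decide (L ≤ y) && decide (y < H) then bd.1 + 1 else bd.1),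
           (fun d1 => if decide (H ≤ y) && decide (y < sl) && decide (y - H + 1 < ni) then
                d1.insert (y - H + 1) (d1.getD (y - H + 1) 0 + 1) else d1)
             (if decide (L ≤ y) && decide (y - L + 1 < ni) then
                bd.2.insert (y - L + 1) (bd.2.getD (y - L + 1) 0 - 1) else bd.2)))
        (b0, d0)).2).getD k 0
      = d0.getD k 0
        + (if 1 ≤ k ∧ k < ni ∧ H + k - 1 < sl then (ys.count (H + k - 1) : Int) else 0)
        - (if 1 ≤ k ∧ k < ni then (ys.count (L + k - 1) : Int) else 0) := by
  intro ys
  induction ys with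
  | nil => intro b0 d0; simp
  | cons y ys ih =>
    intro b0 d0
    simp only [List.foldl_cons]
    rw [ih]
    simp only [List.count_cons, beq_iff_eq]
    push_cast
    by_cases ekL : k = y - L + 1 <;> by_cases ekH : k = y - H + 1 <;>
      (try subst ekL) <;> (try subst ekH) <;>
      (try (have hLH : L = H := by omega; subst hLH)) <;>
      cases hg : (decide (H ≤ y) && decide (y < sl) && decide (y - H + 1 < ni)) <;>
      cases hl : (decide (L ≤ y) && decide (y - L + 1 < ni)) <;>
        simp only [hg, hl, Bool.false_eq_true, if_false, if_true, PySem.Dict.getD_insert] <;>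
          simp only [Bool.and_eq_true, Bool.and_eq_false_iff, decide_eq_true_eq,
            decide_eq_false_iff_not] at hg hl <;>
            split_ifs <;> omega

theorem pvEvents_fold_base (sl L H ni : Int) :
    ∀ (ys : List Int) (b0 : Int) (d0 : PySem.Dict Int Int),
      (ys.foldl (fun bd y =>
          ((if decide (L ≤ y) && decide (y < H) then bd.1 + 1 else bd.1),
           (fun d1 => if decide (H ≤ y) && decide (y < sl) && decide (y - H + 1 < ni) then
                d1.insert (y - H + 1) (d1.getD (y - H + 1) 0 + 1) else d1)
             (if decide (L ≤ y) && decide (y - L + 1 < ni) then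
                bd.2.insert (y - L + 1) (bd.2.getD (y - L + 1) 0 - 1) else bd.2)))
        (b0, d0)).1
      = b0 + ((ys.filter (fun y => decide (L ≤ y) && decide (y < H))).length : Int) := by
  intro ys
  induction ys with
  | nil => intro b0 d0; simp
  | cons y ys ih =>
    intro b0 d0
    simp only [List.foldl_cons]
    rw [ih]
    simp only [List.filter_cons]
    cases hb : (decide (L ≤ y) && decide (y < H)) <;> simp [hb] <;> push_cast <;> ring

-- with no duplicates, a membership count over [l, u) equals the list count in [l, u)
theorem pvC_eq_filter (valid : List Int) (hnd : valid.Nodup) (l u : Int) :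
    pvC valid l u = ((valid.filter (fun y => decide (l ≤ y) && decide (y < u))).length : Int) := by
  unfold pvC
  congr 1
  apply List.Perm.length_eq
  apply List.perm_of_nodup_nodup_toFinset_eq
  · exact (PySem.List.nodup_pyRange_one l u).filter _
  · exact hnd.filter _
  · ext z
    simp only [List.mem_toFinset, List.mem_filter, PySem.List.mem_pyRange_one,
      Bool.and_eq_true, decide_eq_true_eq, List.contains_iff_mem]
    tauto

-- the value stored in B's difference map at key k (for keys the sweep reads)
theorem pvEvents_getD (sl L H ni : Int) (valid : List Int) (hnd : valid.Nodup) (k : Int)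
    (hk1 : 1 ≤ k) (hk2 : k < ni) :
    (pvEvents sl L H ni valid).2.getD k 0 =
      (if valid.contains (H + k - 1) && decide (H + k - 1 < sl) then 1 else 0)
        - (if valid.contains (L + k - 1) then 1 else 0) := by
  unfold pvEvents
  rw [pvEvents_fold_getD]
  rw [PySem.Dict.getD_empty]
  have hcnt : ∀ c : Int, (valid.count c : Int) = (if valid.contains c then 1 else 0) := by
    intro c
    by_cases hm : c ∈ valid
    · rw [List.count_eq_one_of_mem hnd hm, if_pos (List.contains_iff_mem.mpr hm)]
      simp
    · rw [List.count_eq_zero_of_not_mem hm,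
        if_neg (fun hc => hm (List.contains_iff_mem.mp hc))]
      simp
  rw [hcnt, hcnt]
  by_cases hs : H + k - 1 < sl <;> simp [hk1, hk2, hs]

theorem pvEvents_getD_zero (sl L H ni : Int) (valid : List Int) :
    (pvEvents sl L H ni valid).2.getD 0 0 = 0 := by
  unfold pvEvents
  rw [pvEvents_fold_getD]
  simp

theorem pvEvents_base (sl L H ni : Int) (valid : List Int) (hnd : valid.Nodup) :
    (pvEvents sl L H ni valid).1 = pvC valid L H := by
  unfold pvEvents
  rw [pvEvents_fold_base, pvC_eq_filter valid hnd]
  ring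

-- one sweep step: the prefix sum of the difference map advances the exact count
theorem pvCount_step (sl L H : Int) (valid : List Int) (hnd : valid.Nodup) (t : Int)
    (ht : 0 ≤ t) (hlt : t + 1 < sl - L) :
    pvCount sl L H valid t + (pvEvents sl L H (sl - L) valid).2.getD (t + 1) 0
      = pvCount sl L H valid (t + 1) := by
  rw [pvEvents_getD sl L H (sl - L) valid hnd (t + 1) (by omega) (by omega)]
  rw [pvCount_succ sl L H valid t ht]
  have e1 : H + (t + 1) - 1 = H + t := by ring
  have e2 : L + (t + 1) - 1 = L + t := by ring
  rw [e1, e2]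
  split_ifs <;> omega

-- the sweep of B appends exactly the indices whose exact count is positive
theorem pvFoldB_eq (sl L H : Int) (valid : List Int) (hnd : valid.Nodup) :
    ∀ (n : Nat) (t c : Int) (res : List Int), ((sl - L) - t).toNat = n → 0 ≤ t →
      (t < sl - L → c + (pvEvents sl L H (sl - L) valid).2.getD t 0 = pvCount sl L H valid t) →
      ((PySem.List.pyRange t (sl - L) 1).foldl (fun (cr : Int × List Int) x =>
          (cr.1 + (pvEvents sl L H (sl - L) valid).2.getD x 0,
           if valid.contains x && decide (cr.1 + (pvEvents sl L H (sl - L) valid).2.getD x 0 > 0) then cr.2 ++ [x] else cr.2)) (c, res)).2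
        = res ++ (PySem.List.pyRange t (sl - L) 1).filter
            (fun u => valid.contains u && decide (pvCount sl L H valid u > 0)) := by
  intro n
  induction n with
  | zero =>
    intro t c res h0 ht hc
    rw [PySem.List.pyRange_one_eq_nil (by omega : sl - L ≤ t)]
    simp
  | succ n ih =>
    intro t c res h0 ht hc
    have hlt : t < sl - L := by omega
    rw [PySem.List.pyRange_one_cons hlt]
    simp only [List.foldl_cons, List.filter_cons]
    rw [hc hlt]
    rw [ih (t + 1) (pvCount sl L H valid t) _ (by omega) (by omega)
        (fun h => pvCount_step sl L H valid hnd t ht h)]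
    by_cases hp : (valid.contains t && decide (pvCount sl L H valid t > 0)) = true
    · rw [if_pos hp, if_pos hp]
      simp
    · rw [if_neg hp, if_neg hp]

-- ===== VERDICT (by name: the statement is the Claim_ definition above) =====
theorem find_with_subsequent_within_spec : Claim_equal_find_with_subsequent_within := by
  unfold Claim_equal_find_with_subsequent_within Spec_find_with_subsequent_within
  intro sl vs low high _hdom hpre
  obtain ⟨hlow, hnd⟩ := hpre
  unfold find_with_subsequent_within find_with_subsequent_within_alt
  simp only []
  rw [pvLoopA_eq sl (low.getD 1) (high.getD sl) vs (sl - low.getD 1).toNat 0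
      (low.getD 1) (high.getD sl) _ [] rfl (by ring) (by ring) le_rfl
      (by rw [pvCount_zero]; rfl)]
  rw [pvFoldB_eq sl (low.getD 1) (high.getD sl) vs hnd ((sl - low.getD 1) - 0).toNat 0
      (pvEvents sl (low.getD 1) (high.getD sl) (sl - low.getD 1) vs).1 [] rfl le_rfl
      (fun _h => by
        rw [pvEvents_getD_zero, pvEvents_base sl (low.getD 1) (high.getD sl) (sl - low.getD 1) vs hnd,
          pvCount_zero]
        ring)]
  by_cases hpos : 0 ≤ sl - low.getD 1
  · rw [max_eq_right hpos]
  · rw [max_eq_left (by omega), PySem.List.pyRange_one_eq_nil le_rfl,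
      PySem.List.pyRange_one_eq_nil (by omega : sl - low.getD 1 ≤ 0)]
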